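-- pv_equiv track=rewrite | github.com/miliar/Code_Jam_Webscraper | solutions_python/solutions_year15_round0_nr1/3082.py | calculate
-- ===== SOURCE A (Python) =====
-- def calculate(string):
-- 	current_standing = int(string[0])
-- 	friend_required = 0
-- 	l = len(string)
-- 	for i in range(1,l-1):
-- 		if current_standing >= i :
-- 			current_standing += int(string[i])
-- 		else:
-- 			friend_required += (i - current_standing)
-- 			current_standing = i + int(string[i])
--
-- 	return friend_required
-- ===== SOURCE B (Python) =====
-- def calculate(string):
-- 	total = int(string[0])
-- 	shortfalls = []
-- 	for i in range(1, len(string) - 1):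
-- 		shortfalls.append(i - total)
-- 		total += int(string[i])
-- 	best = 0
-- 	for s in reversed(shortfalls):
-- 		if s > best:
-- 			best = s
-- 	return best
-- ===== Notes on version B (the rewrite author's own statement) =====
-- stated objective: alternative
-- what changed: B is staged: a first pass records every shortfall i - prefix against an honest prefix sum into a list, then a second back-to-front reduction takes the largest positive shortfall, instead of A's single greedy pass that accumulates deficits and resets the standing count to i + digit.
import Mathlib
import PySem

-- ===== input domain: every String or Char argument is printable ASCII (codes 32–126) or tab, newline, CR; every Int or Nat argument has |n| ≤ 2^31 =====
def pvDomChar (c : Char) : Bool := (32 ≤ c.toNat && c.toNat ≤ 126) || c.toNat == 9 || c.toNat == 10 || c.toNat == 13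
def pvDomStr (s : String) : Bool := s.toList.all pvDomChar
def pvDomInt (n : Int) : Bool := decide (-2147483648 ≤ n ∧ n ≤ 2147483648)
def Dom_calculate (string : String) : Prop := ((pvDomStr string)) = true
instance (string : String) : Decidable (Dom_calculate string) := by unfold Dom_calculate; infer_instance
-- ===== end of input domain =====

-- B stages the work: one pass records each shortfall i - prefix into a list, a second
-- back-to-front pass keeps the largest positive one (alternative decomposition, same cost).

-- int(string[i]) for a single character: exact wherever the index is in range and the character
-- is a digit; the `getD`/`elim` defaults are never reached inside Pre_calculate.
def pyIntAt (chars : List Char) (i : Int) : Int :=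
  (PySem.Int.ofChars? ((PySem.List.pyGet? chars i).elim [] (fun c => [c]))).getD 0

-- ===== PORT A =====
def calculate (string : String) : Int :=
  let chars := string.toList
  let l : Int := chars.length
  let st := (PySem.List.pyRange 1 (l - 1) 1).foldl
    (fun (s : Int × Int) (i : Int) =>
      if s.1 ≥ i then (s.1 + pyIntAt chars i, s.2)
      else (i + pyIntAt chars i, s.2 + (i - s.1)))
    (pyIntAt chars 0, 0)
  st.2

-- ===== PORT B =====
def calculate_alt (string : String) : Int :=
  let chars := string.toList
  let l : Int := chars.length
  let built := (PySem.List.pyRange 1 (l - 1) 1).foldl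
    (fun (acc : List Int × Int) (i : Int) =>
      (acc.1 ++ [i - acc.2], acc.2 + pyIntAt chars i))
    ([], pyIntAt chars 0)
  built.1.reverse.foldl (fun (b : Int) (s : Int) => if s > b then s else b) 0

-- ===== PRECONDITION & SPEC =====
-- A raises IndexError on the empty string and ValueError when a used character (index 0, or
-- indices 1..len-2) is not a decimal digit; Pre_ excludes exactly those raising inputs.
def Pre_calculate (string : String) : Prop :=
  string.toList ≠ [] ∧ (string.toList.headD ' ').isDigit = true ∧
    ((string.toList.drop 1).dropLast.all Char.isDigit) = true
instance (string : String) : Decidable (Pre_calculate string) := by unfold Pre_calculate; infer_instance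
def pvWitness_calculate : String := "0110"
def Spec_calculate (string : String) (out : Int) : Prop := out = calculate_alt string
instance (string : String) (out : Int) : Decidable (Spec_calculate string out) := by unfold Spec_calculate; infer_instance

-- ===== CLAIM (what is proved, stated in full; the proofs are below) =====
def Claim_equal_calculate : Prop := ∀ (string : String), Dom_calculate string → Pre_calculate string → Spec_calculate string (calculate string)

-- ===== LEMMAS AND PROOFS =====

-- The shortfall list B's first pass builds, in recursive form.
def sfList (chars : List Char) : List Int → Int → List Int
  | [], _ => []
  | i :: L, t => (i - t) :: sfList chars L (t + pyIntAt chars i)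

-- B's max step is Int.max.
lemma step_max (b s : Int) : (if s > b then s else b) = max b s := by
  split_ifs <;> omega

-- B's first pass builds acc ++ sfList.
lemma build_spec (chars : List Char) : ∀ (L : List Int) (acc : List Int) (t : Int),
    (L.foldl (fun (acc : List Int × Int) (i : Int) =>
        (acc.1 ++ [i - acc.2], acc.2 + pyIntAt chars i)) (acc, t)).1
      = acc ++ sfList chars L t := by
  intro L
  induction L with
  | nil => intro acc t; simp [sfList]
  | cons i L ih =>
    intro acc t
    simp only [List.foldl, sfList]
    rw [ih]
    simp

-- Pulling an element out of a running max.
lemma mx_extract (L : List Int) : ∀ (f a : Int),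
    L.foldl max (max f a) = max (L.foldl max f) a := by
  induction L with
  | nil => intro f a; rfl
  | cons c L ih =>
    intro f a
    simp only [List.foldl]
    rw [show max (max f a) c = max (max f c) a by omega, ih]

-- The reduction order of a max-fold is irrelevant, so reversing the list changes nothing.
lemma mx_reverse (L : List Int) : ∀ (f : Int),
    L.reverse.foldl max f = L.foldl max f := by
  induction L with
  | nil => intro f; rfl
  | cons a L ih =>
    intro f
    simp only [List.reverse_cons, List.foldl_append, List.foldl, ih]
    rw [← mx_extract]

-- Max-fold over the shortfall list equals a one-pass running-max fold.
lemma sf_mx (chars : List Char) : ∀ (L : List Int) (t f : Int),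
    (sfList chars L t).foldl max f
      = (L.foldl (fun (s : Int × Int) (i : Int) =>
          (s.1 + pyIntAt chars i, max s.2 (i - s.1))) (t, f)).2 := by
  intro L
  induction L with
  | nil => intro t f; rfl
  | cons i L ih =>
    intro t f
    simp only [sfList, List.foldl]
    exact ih (t + pyIntAt chars i) (max f (i - t))

-- Loop invariant: A's current_standing equals B's prefix plus the (shared) friend count,
-- and A's accumulated deficits equal the running maximum shortfall.
lemma loop_eq (chars : List Char) (L : List Int) : ∀ (p f : Int),
    (L.foldl
      (fun (s : Int × Int) (i : Int) =>
        if s.1 ≥ i then (s.1 + pyIntAt chars i, s.2)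
        else (i + pyIntAt chars i, s.2 + (i - s.1)))
      (p + f, f)).2
    = (L.foldl
      (fun (s : Int × Int) (i : Int) => (s.1 + pyIntAt chars i, max s.2 (i - s.1)))
      (p, f)).2 := by
  induction L with
  | nil => intro p f; rfl
  | cons i t ih =>
    intro p f
    simp only [List.foldl]
    by_cases h : p + f ≥ i
    · rw [if_pos h, show max f (i - p) = f by omega,
        show p + f + pyIntAt chars i = (p + pyIntAt chars i) + f by ring]
      exact ih (p + pyIntAt chars i) f
    · rw [if_neg h, show max f (i - p) = i - p by omega,
        show f + (i - (p + f)) = i - p by ring,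
        show i + pyIntAt chars i = (p + pyIntAt chars i) + (i - p) by ring]
      exact ih (p + pyIntAt chars i) (i - p)

-- ===== VERDICT (by name: the statement is the Claim_ definition above) =====
theorem calculate_spec : Claim_equal_calculate := by
  intro s _ _
  unfold Spec_calculate calculate calculate_alt
  simp only [step_max, build_spec, List.nil_append, mx_reverse, sf_mx]
  simpa using loop_eq s.toList
    (PySem.List.pyRange 1 ((s.toList.length : Int) - 1) 1) (pyIntAt s.toList 0) 0
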